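-- pv_equiv track=rewrite | github.com/m1sterzer0/JuliaAtcoder | python/abc170_179/abc179_D2.py | solve
-- ===== SOURCE A (Python) =====
-- class fenwicktree :
--     bit = []; n = 0; tot = 0; e = 0; op = sum
--
--     def __init__(self,n=1,op=sum,e=0) :
--         self.n = n; self.tot = e; self.e = e; self.op = op
--         self.bit = [e for i in range(n+1)]
--
--     def clear(self) :
--         for i in range(self.n) : self.bit[i] = self.e
--         self.tot = self.e
--
--     def inc(self,idx,val=1) :
--         while idx <= self.n :
--             self.bit[idx] = self.op(self.bit[idx],val)
--             idx += idx & (-idx)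
--         self.tot = self.op(self.tot,val)
--
--     def dec(self,idx,val=1) : self.inc(idx,-val)
--
--     def incdec(self,left,right,val) :
--         self.inc(left,val); self.dec(right,val)
--
--     def prefixsum(self,idx) :
--         if idx < 1 : return 0
--         ans = 0
--         while idx > 0 :
--             ans += self.bit[idx]
--             idx -= idx&(-idx)
--         return ans
--
--     def suffixsum(self,idx) : return self.tot - self.prefixsum(idx-1)
--     def rangesum(self,left,right)  : return self.prefixsum(right) - self.prefixsum(left-1)
--
-- def fenwicktreeop(a,b) : return (a + b) % 998244353
--
-- def solve(N,K,L,R) :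
--     ft = fenwicktree(N+1,fenwicktreeop,0)
--     ft.inc(N,1)
--     for i in range(N-1,0,-1) :
--         v = 0
--         for (l,r) in zip(L,R) :
--             if i + l > N : continue
--             v = (v + ft.rangesum(i+l,min(N,i+r))) % 998244353
--         if i == 1 : return v
--         ft.inc(i,v)
--     return 0 ## Shouldn't get here
-- ===== SOURCE B (Python) =====
-- # B: backward DP over a suffix cumulative-sum array instead of a Fenwick tree
-- # (same answers; one array lookup per segment bound instead of a Fenwick bit walk).
-- MOD = 998244353
--
-- def solve(N, K, L, R):
--     # S[j] = dp[j] + dp[j+1] + ... + dp[N]  (exact integer suffix sums of the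
--     # mod-reduced dp values), with S[j] = S[i+1] left untouched for j <= i.
--     S = [0] * (N + 2)
--     S[N] = 1  # dp[N] = 1
--     for i in range(N - 1, 0, -1):
--         v = 0
--         for l, r in zip(L, R):
--             lo = i + l
--             if lo > N:
--                 continue
--             hi = min(N, i + r)
--             v = (v + S[max(lo, i + 1)] - S[max(hi + 1, i + 1)]) % MOD
--         if i == 1:
--             return v
--         S[i] = v + S[i + 1]
--     return 0
-- ===== Notes on version B (the rewrite author's own statement) =====
-- stated objective: alternative
-- what changed: Replaces A's Fenwick (binary indexed) tree and its bit-walk updates/queries by a single suffix cumulative-sum array filled once during the same backward DP, so each segment query is two direct array lookups and each DP step one store.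
-- outside the precondition, e.g. on solve(0, 0, [1], [1]): A does not finish within the time limit, B returns 0; on solve(-3, 0, [1], [1]): A raises IndexError, B raises IndexError
import Mathlib
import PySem

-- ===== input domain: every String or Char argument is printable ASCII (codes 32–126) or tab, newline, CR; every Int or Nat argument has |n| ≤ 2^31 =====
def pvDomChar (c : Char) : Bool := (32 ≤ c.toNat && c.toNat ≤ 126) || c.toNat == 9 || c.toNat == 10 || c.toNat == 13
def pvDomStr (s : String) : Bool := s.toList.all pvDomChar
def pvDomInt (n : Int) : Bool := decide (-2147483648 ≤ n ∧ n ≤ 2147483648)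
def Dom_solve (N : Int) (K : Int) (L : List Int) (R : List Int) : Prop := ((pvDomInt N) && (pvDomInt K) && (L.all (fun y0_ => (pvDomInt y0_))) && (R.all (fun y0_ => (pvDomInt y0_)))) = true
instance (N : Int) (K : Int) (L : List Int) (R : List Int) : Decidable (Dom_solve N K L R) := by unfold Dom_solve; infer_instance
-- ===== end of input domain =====

-- B replaces A's Fenwick tree by a suffix cumulative-sum array filled during the same
-- backward DP (one array lookup per segment bound instead of a Fenwick bit walk).

-- ===== PORT A =====
-- Python fenwicktree object: fields n, tot, e, bit, op (dec/incdec/clear/suffixsum unused by solve).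
structure Fenwick where
  n : Int
  tot : Int
  e : Int
  op : Int → Int → Int
  bit : List Int

def fenwicktreeop (a b : Int) : Int := PySem.Int.mod (a + b) 998244353

-- while idx <= n: bit[idx] = op(bit[idx], val); idx += idx & (-idx).
-- `Int.land idx (-idx)` is Python's `idx & (-idx)` (two's complement, exact).
-- Fuel only makes the while-loop total (enough iterations whenever idx ≥ 1, the only
-- case Python terminates on); reads/writes use pyGetD/pySetD (exact for in-range idx;
-- Python raises out of range, excluded by Pre_).
def fenIncLoop (n : Int) (op : Int → Int → Int) : Nat → List Int → Int → Int → List Int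
  | 0, bit, _, _ => bit
  | fuel + 1, bit, idx, val =>
    if idx ≤ n then
      fenIncLoop n op fuel
        (PySem.List.pySetD bit idx (op (PySem.List.pyGetD bit idx 0) val))
        (idx + Int.land idx (-idx)) val
    else bit

def fenInc (ft : Fenwick) (idx val : Int) : Fenwick :=
  { ft with bit := fenIncLoop ft.n ft.op ((ft.n - idx).toNat + 1) ft.bit idx val,
            tot := ft.op ft.tot val }

-- if idx < 1: return 0; ans = 0; while idx > 0: ans += bit[idx]; idx -= idx & (-idx)
def fenPreLoop (bit : List Int) : Nat → Int → Int → Int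
  | 0, _, ans => ans
  | fuel + 1, idx, ans =>
    if idx > 0 then
      fenPreLoop bit fuel (idx - Int.land idx (-idx)) (ans + PySem.List.pyGetD bit idx 0)
    else ans

def fenPrefixsum (ft : Fenwick) (idx : Int) : Int :=
  if idx < 1 then 0 else fenPreLoop ft.bit idx.toNat idx 0

def fenRangesum (ft : Fenwick) (left right : Int) : Int :=
  fenPrefixsum ft right - fenPrefixsum ft (left - 1)

-- inner loop: for (l,r) in zip(L,R): if i+l > N: continue; v = (v + rangesum(i+l, min(N,i+r))) % p
def solveInner (N : Int) (ft : Fenwick) (i : Int) (Lz : List (Int × Int)) : Int :=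
  Lz.foldl (fun v lr =>
    if i + lr.1 > N then v
    else PySem.Int.mod (v + fenRangesum ft (i + lr.1) (min N (i + lr.2))) 998244353) 0

-- for i in range(N-1, 0, -1): v = …; if i == 1: return v; ft.inc(i, v)  (fallthrough returns 0)
def solveLoop (N : Int) (Lz : List (Int × Int)) : List Int → Fenwick → Int
  | [], _ => 0
  | i :: rest, ft =>
    let v := solveInner N ft i Lz
    if i = 1 then v else solveLoop N Lz rest (fenInc ft i v)

def solve (N : Int) (K : Int) (L : List Int) (R : List Int) : Int :=
  let ft : Fenwick :=
    { n := N + 1, tot := 0, e := 0, op := fenwicktreeop,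
      bit := List.replicate ((N + 1) + 1).toNat 0 }
  solveLoop N (L.zip R) (PySem.List.pyRange (N - 1) 0 (-1)) (fenInc ft N 1)

-- ===== PORT B =====
-- v = (v + S[max(lo, i+1)] - S[max(hi+1, i+1)]) % MOD
def altInner (N : Int) (S : List Int) (i : Int) (Lz : List (Int × Int)) : Int :=
  Lz.foldl (fun v lr =>
    let lo := i + lr.1
    if lo > N then v
    else
      let hi := min N (i + lr.2)
      PySem.Int.mod
        (v + PySem.List.pyGetD S (max lo (i + 1)) 0 - PySem.List.pyGetD S (max (hi + 1) (i + 1)) 0)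
        998244353) 0

-- for i in range(N-1, 0, -1): v = …; if i == 1: return v; S[i] = v + S[i+1]
def altLoop (N : Int) (Lz : List (Int × Int)) : List Int → List Int → Int
  | [], _ => 0
  | i :: rest, S =>
    let v := altInner N S i Lz
    if i = 1 then v
    else altLoop N Lz rest (PySem.List.pySetD S i (v + PySem.List.pyGetD S (i + 1) 0))

def solve_alt (N : Int) (K : Int) (L : List Int) (R : List Int) : Int :=
  let S := PySem.List.pySetD (List.replicate (N + 2).toNat 0) N 1   -- S = [0]*(N+2); S[N] = 1
  altLoop N (L.zip R) (PySem.List.pyRange (N - 1) 0 (-1)) S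

-- ===== PRECONDITION & SPEC =====
-- Pre_ excludes N ≤ 0, where A never returns: its first Fenwick update loops forever
-- (idx & -idx = 0 sticks at idx = 0) for N = 0 and N = -1, and raises IndexError for N ≤ -2.
def Pre_solve (N : Int) (K : Int) (L : List Int) (R : List Int) : Prop := 1 ≤ N
instance (N : Int) (K : Int) (L : List Int) (R : List Int) : Decidable (Pre_solve N K L R) := by
  unfold Pre_solve; infer_instance

def pvWitness_solve : Int × Int × List Int × List Int := (4, 0, [1, 2], [1, 3])

def Spec_solve (N : Int) (K : Int) (L : List Int) (R : List Int) (out : Int) : Prop :=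
  out = solve_alt N K L R
instance (N : Int) (K : Int) (L : List Int) (R : List Int) (out : Int) :
    Decidable (Spec_solve N K L R out) := by unfold Spec_solve; infer_instance

-- ===== CLAIM (what is proved, stated in full; the proofs are below) =====
def Claim_equal_solve : Prop :=
  ∀ (N : Int) (K : Int) (L : List Int) (R : List Int),
    Dom_solve N K L R → Pre_solve N K L R → Spec_solve N K L R (solve N K L R)

-- ===== LEMMAS AND PROOFS =====

def lowb (i : Int) : Int := Int.land i (-i)

-- ---- bit arithmetic: lowb (2^k * odd) = 2^k ----
lemma ldiff_odd (q : ℕ) : Nat.ldiff (2 * q + 1) (2 * q) = 1 := by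
  apply Nat.eq_of_testBit_eq
  intro i
  rw [Nat.testBit_ldiff]
  cases i with
  | zero =>
    rw [Nat.testBit_zero, Nat.testBit_zero, Nat.testBit_zero]
    simp
  | succ i =>
    rw [Nat.testBit_succ, Nat.testBit_succ, Nat.testBit_succ]
    have h1 : (2 * q + 1) / 2 = q := by omega
    have h2 : (2 * q) / 2 = q := by omega
    have h3 : (1 : ℕ) / 2 = 0 := by omega
    rw [h1, h2, h3]
    simp [Nat.zero_testBit]

lemma ldiff_double (y : ℕ) (hy : 0 < y) :
    Nat.ldiff (2 * y) (2 * y - 1) = 2 * Nat.ldiff y (y - 1) := by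
  apply Nat.eq_of_testBit_eq
  intro i
  rw [Nat.testBit_ldiff]
  cases i with
  | zero =>
    rw [Nat.testBit_zero, Nat.testBit_zero]
    simp
  | succ i =>
    rw [Nat.testBit_succ, Nat.testBit_succ, Nat.testBit_succ]
    have h1 : (2 * y) / 2 = y := by omega
    have h2 : (2 * y - 1) / 2 = y - 1 := by omega
    have h3 : (2 * Nat.ldiff y (y - 1)) / 2 = Nat.ldiff y (y - 1) := by omega
    rw [h1, h2, h3, Nat.testBit_ldiff]

lemma ldiff_pow (k q : ℕ) :
    Nat.ldiff (2 ^ k * (2 * q + 1)) (2 ^ k * (2 * q + 1) - 1) = 2 ^ k := by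
  induction k with
  | zero => simpa using ldiff_odd q
  | succ k ih =>
    have hy : 0 < 2 ^ k * (2 * q + 1) := by positivity
    have h : 2 ^ (k + 1) * (2 * q + 1) = 2 * (2 ^ k * (2 * q + 1)) := by ring
    rw [h, ldiff_double _ hy, ih]
    ring

lemma lowb_eq_pow (k q : ℕ) :
    lowb ((2 ^ k * (2 * q + 1) : ℕ) : Int) = ((2 ^ k : ℕ) : Int) := by
  have hm : 0 < 2 ^ k * (2 * q + 1) := by positivity
  obtain ⟨t, ht⟩ : ∃ t, 2 ^ k * (2 * q + 1) = t + 1 := ⟨2 ^ k * (2 * q + 1) - 1, by omega⟩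
  have hneg : -(((t + 1 : ℕ)) : Int) = Int.negSucc t := rfl
  have hland : Int.land (((t + 1 : ℕ)) : Int) (Int.negSucc t) = (((t + 1).ldiff t : ℕ) : Int) := rfl
  have hld : (t + 1).ldiff t = 2 ^ k := by
    have := ldiff_pow k q
    rw [ht] at this
    simpa using this
  rw [ht]
  unfold lowb
  rw [hneg, hland, hld]

lemma int_decomp {c : Int} (hc : 0 < c) :
    ∃ k q : ℕ, c = ((2 ^ k * (2 * q + 1) : ℕ) : Int) := by
  obtain ⟨m, rfl⟩ : ∃ m : ℕ, c = (m : Int) := ⟨c.toNat, by omega⟩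
  have hm : m ≠ 0 := by
    intro h; subst h; simp at hc
  obtain ⟨k, o, hodd, rfl⟩ := Nat.exists_eq_two_pow_mul_odd hm
  obtain ⟨q, rfl⟩ := hodd
  exact ⟨k, q, by push_cast; ring⟩

lemma lowb_pos {c : Int} (hc : 0 < c) : 0 < lowb c ∧ lowb c ≤ c := by
  obtain ⟨k, q, rfl⟩ := int_decomp hc
  rw [lowb_eq_pow]
  constructor
  · positivity
  · push_cast
    nlinarith [pow_pos (show (0:Int) < 2 by norm_num) k]

lemma lowb_double {c : Int} (hc : 0 < c) : 2 * lowb c ≤ lowb (c + lowb c) := by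
  obtain ⟨k, q, rfl⟩ := int_decomp hc
  rw [lowb_eq_pow]
  obtain ⟨a, b, hab⟩ : ∃ a b : ℕ, q + 1 = 2 ^ a * (2 * b + 1) := by
    have h1 : (0 : Int) < ((q + 1 : ℕ) : Int) := by positivity
    obtain ⟨a, b, hab⟩ := int_decomp h1
    exact ⟨a, b, by exact_mod_cast hab⟩
  have h2N : 2 ^ (k + 1 + a) * (2 * b + 1) = 2 ^ k * (2 * q + 1) + 2 ^ k := by
    have e : 2 ^ (k + 1 + a) * (2 * b + 1) = 2 ^ (k + 1) * (2 ^ a * (2 * b + 1)) := by ring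
    rw [e, ← hab]; ring
  have h2 : ((2 ^ k * (2 * q + 1) : ℕ) : Int) + ((2 ^ k : ℕ) : Int)
      = ((2 ^ (k + 1 + a) * (2 * b + 1) : ℕ) : Int) := by
    rw [h2N]; push_cast; ring
  rw [h2, lowb_eq_pow]
  have hN : 2 * 2 ^ k ≤ 2 ^ (k + 1 + a) := by
    calc 2 * 2 ^ k = 2 ^ (k + 1) := by ring
    _ ≤ 2 ^ (k + 1 + a) := Nat.pow_le_pow_right (by norm_num) (by omega)
  exact_mod_cast hN

lemma lowb_gap {c j : Int} (hc : 0 < c) (h1 : c < j) (h2 : j < c + lowb c) :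
    c ≤ j - lowb j := by
  obtain ⟨k, q, hckq⟩ := int_decomp hc
  have hlbc : lowb c = ((2 ^ k : ℕ) : Int) := by rw [hckq]; exact lowb_eq_pow k q
  have ht0 : 0 < j - c := by omega
  obtain ⟨s, u, htsu⟩ := int_decomp ht0
  have htsN : 2 ^ s * (2 * u + 1) < 2 ^ k := by
    have hts : ((2 ^ s * (2 * u + 1) : ℕ) : Int) < ((2 ^ k : ℕ) : Int) := by
      rw [← htsu, ← hlbc]; omega
    exact_mod_cast hts
  have hsk : s < k := by
    by_contra h
    have hss : 2 ^ k ≤ 2 ^ s := Nat.pow_le_pow_right (by norm_num) (by omega)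
    have : 2 ^ s ≤ 2 ^ s * (2 * u + 1) := Nat.le_mul_of_pos_right _ (by omega)
    omega
  obtain ⟨d, hd⟩ : ∃ d, k = d + 1 + s := ⟨k - s - 1, by omega⟩
  subst hd
  have hcomb : 2 ^ (d + 1 + s) * (2 * q + 1) + 2 ^ s * (2 * u + 1)
      = 2 ^ s * (2 * (2 ^ d * (2 * q + 1) + u) + 1) := by ring
  have hj : j = ((2 ^ s * (2 * (2 ^ d * (2 * q + 1) + u) + 1) : ℕ) : Int) := by
    have e1 : ((2 ^ (d + 1 + s) * (2 * q + 1) + 2 ^ s * (2 * u + 1) : ℕ) : Int)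
        = ((2 ^ (d + 1 + s) * (2 * q + 1) : ℕ) : Int) + ((2 ^ s * (2 * u + 1) : ℕ) : Int) := by
      push_cast; ring
    rw [← hcomb, e1, ← hckq, ← htsu]; ring
  have hlbj : lowb j = ((2 ^ s : ℕ) : Int) := by rw [hj]; exact lowb_eq_pow s _
  have hle : lowb j ≤ j - c := by
    rw [hlbj, htsu]
    have : 2 ^ s ≤ 2 ^ s * (2 * u + 1) := Nat.le_mul_of_pos_right _ (by omega)
    exact_mod_cast this
  omega

-- ---- modular helper ----
lemma pymod_congr {a b : Int} (h : a ≡ b [ZMOD 998244353]) :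
    PySem.Int.mod a 998244353 = PySem.Int.mod b 998244353 := by
  show a.fmod 998244353 = b.fmod 998244353
  rw [Int.fmod_eq_emod, Int.fmod_eq_emod]
  have e : a % 998244353 = b % 998244353 := h
  simp [e]

lemma emod_self_modeq (a : Int) : a % 998244353 ≡ a [ZMOD 998244353] :=
  Int.emod_emod_of_dvd a dvd_rfl

lemma sum_Ioc_split (f : ℤ → ℤ) {a b c : ℤ} (h1 : a ≤ b) (h2 : b ≤ c) :
    ∑ k ∈ Finset.Ioc a b, f k + ∑ k ∈ Finset.Ioc b c, f k = ∑ k ∈ Finset.Ioc a c, f k := by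
  rw [← Finset.sum_union (Finset.disjoint_left.mpr (by
      intro x hx hx'
      rw [Finset.mem_Ioc] at hx hx'
      omega)),
    Finset.Ioc_union_Ioc_eq_Ioc h1 h2]

lemma pyGetD_pySetD_int {xs : List Int} {iv jv v d : Int}
    (hi0 : 0 ≤ iv) (hilen : iv < (xs.length : Int)) (hj0 : 0 ≤ jv) (hjlen : jv < (xs.length : Int)) :
    PySem.List.pyGetD (PySem.List.pySetD xs iv v) jv d =
      if jv = iv then v else PySem.List.pyGetD xs jv d := by
  rw [PySem.List.pySetD_of_nonneg xs v hi0,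
    PySem.List.pyGetD_eq_getElem _ d hj0 (by simpa using hjlen),
    List.getElem_set]
  by_cases h : jv = iv
  · rw [if_pos (by omega), if_pos h]
  · rw [if_neg (by omega), if_neg h, PySem.List.pyGetD_eq_getElem _ d hj0 hjlen]

-- ---- Fenwick invariant ----
def FInv (n : Int) (f : Int → Int) (bit : List Int) : Prop :=
  ∀ j : Int, 1 ≤ j → j ≤ n →
    PySem.List.pyGetD bit j 0 ≡ (∑ k ∈ Finset.Ioc (j - lowb j) j, f k) [ZMOD 998244353]

lemma fenIncLoop_inv (n : Int) (f : Int → Int) (idx val : Int)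
    (hidx : 1 ≤ idx) (hin : idx ≤ n) :
    ∀ (fuel : Nat) (c : Int) (bit : List Int),
      bit.length = (n + 1).toNat →
      idx ≤ c → c - lowb c < idx → (n + 1 - c).toNat ≤ fuel →
      (∀ j : Int, 1 ≤ j → j ≤ n → j < c →
        PySem.List.pyGetD bit j 0 ≡
          (∑ k ∈ Finset.Ioc (j - lowb j) j, Function.update f idx (f idx + val) k) [ZMOD 998244353]) →
      (∀ j : Int, 1 ≤ j → j ≤ n → c ≤ j →
        PySem.List.pyGetD bit j 0 ≡ (∑ k ∈ Finset.Ioc (j - lowb j) j, f k) [ZMOD 998244353]) →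
      FInv n (Function.update f idx (f idx + val)) (fenIncLoop n fenwicktreeop fuel bit c val) ∧
      (fenIncLoop n fenwicktreeop fuel bit c val).length = (n + 1).toNat := by
  have hn0 : 0 ≤ n := by omega
  intro fuel
  induction fuel with
  | zero =>
    intro c bit hlen _ _ hfuel H1 _
    have hcn : n < c := by omega
    exact ⟨fun j hj1 hjn => H1 j hj1 hjn (by omega), hlen⟩
  | succ fuel ih =>
    intro c bit hlen hc1 hc2 hfuel H1 H2
    by_cases hcn : c ≤ n
    · have hc0 : 0 < c := by omega
      obtain ⟨hlb0, hlble⟩ := lowb_pos hc0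
      have hstep : fenIncLoop n fenwicktreeop (fuel + 1) bit c val =
          fenIncLoop n fenwicktreeop fuel
            (PySem.List.pySetD bit c (fenwicktreeop (PySem.List.pyGetD bit c 0) val))
            (c + lowb c) val := by
        simp [fenIncLoop, hcn]; rfl
      rw [hstep]
      have hlen' : (PySem.List.pySetD bit c (fenwicktreeop (PySem.List.pyGetD bit c 0) val)).length
          = (n + 1).toNat := by
        rw [PySem.List.length_pySetD, hlen]
      have hcltlen : c < (bit.length : Int) := by rw [hlen]; omega
      have hget' : ∀ j : Int, 0 ≤ j → j < (bit.length : Int) →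
          PySem.List.pyGetD (PySem.List.pySetD bit c (fenwicktreeop (PySem.List.pyGetD bit c 0) val)) j 0 =
            if j = c then fenwicktreeop (PySem.List.pyGetD bit c 0) val
            else PySem.List.pyGetD bit j 0 := by
        intro j hj0 hjlen
        exact pyGetD_pySetD_int (by omega) hcltlen hj0 hjlen
      have h2lb := lowb_double hc0
      have harg1 : idx ≤ c + lowb c := by omega
      have harg2 : (c + lowb c) - lowb (c + lowb c) < idx := by omega
      have harg3 : (n + 1 - (c + lowb c)).toNat ≤ fuel := by omega
      apply ih (c + lowb c) _ hlen' harg1 harg2 harg3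
      · -- H1 for j < c + lowb c
        intro j hj1 hjn hjlt
        rw [hget' j (by omega) (by rw [hlen]; omega)]
        by_cases hjc : j = c
        · subst hjc
          rw [if_pos rfl]
          have hmem : idx ∈ Finset.Ioc (j - lowb j) j := by
            rw [Finset.mem_Ioc]; omega
          have hsum : (∑ k ∈ Finset.Ioc (j - lowb j) j, Function.update f idx (f idx + val) k)
              = (∑ k ∈ Finset.Ioc (j - lowb j) j, f k) + val := by
            rw [← Finset.add_sum_erase _ (fun k => Function.update f idx (f idx + val) k) hmem,
              ← Finset.add_sum_erase _ f hmem]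
            have h1 : Function.update f idx (f idx + val) idx = f idx + val := by simp
            have h2 : ∀ k ∈ (Finset.Ioc (j - lowb j) j).erase idx,
                Function.update f idx (f idx + val) k = f k := by
              intro k hk
              rw [Finset.mem_erase] at hk
              exact Function.update_of_ne hk.1 _ f
            rw [h1, Finset.sum_congr rfl h2]
            ring
          rw [hsum]
          show (PySem.List.pyGetD bit j 0 + val).fmod 998244353 ≡ _ [ZMOD 998244353]
          have hfe : (PySem.List.pyGetD bit j 0 + val).fmod 998244353
              = (PySem.List.pyGetD bit j 0 + val) % 998244353 := by
            rw [Int.fmod_eq_emod]; simp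
          rw [hfe]
          exact (emod_self_modeq _).trans ((H2 j hj1 hjn (by omega)).add_right val)
        · rw [if_neg hjc]
          by_cases hjlo : j < c
          · exact H1 j hj1 hjn hjlo
          · have hjgt : c < j := by omega
            have hgap : c ≤ j - lowb j := lowb_gap hc0 hjgt hjlt
            have hsum : (∑ k ∈ Finset.Ioc (j - lowb j) j, Function.update f idx (f idx + val) k)
                = ∑ k ∈ Finset.Ioc (j - lowb j) j, f k := by
              apply Finset.sum_congr rfl
              intro k hk
              rw [Finset.mem_Ioc] at hk
              exact Function.update_of_ne (by omega) _ f
            rw [hsum]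
            exact H2 j hj1 hjn (by omega)
      · -- H2 for j ≥ c + lowb c : untouched
        intro j hj1 hjn hjge
        rw [hget' j (by omega) (by rw [hlen]; omega), if_neg (by omega)]
        exact H2 j hj1 hjn (by omega)
    · -- loop exit
      have : fenIncLoop n fenwicktreeop (fuel + 1) bit c val = bit := by
        simp [fenIncLoop, hcn]
      rw [this]
      exact ⟨fun j hj1 hjn => H1 j hj1 hjn (by omega), hlen⟩

lemma fenInc_inv {ft : Fenwick} {f : Int → Int} {idx val : Int}
    (hop : ft.op = fenwicktreeop) (hn : ft.bit.length = (ft.n + 1).toNat)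
    (hidx : 1 ≤ idx) (hin : idx ≤ ft.n) (hF : FInv ft.n f ft.bit) :
    FInv ft.n (Function.update f idx (f idx + val)) (fenInc ft idx val).bit ∧
    (fenInc ft idx val).bit.length = (ft.n + 1).toNat := by
  have hbit : (fenInc ft idx val).bit =
      fenIncLoop ft.n fenwicktreeop ((ft.n - idx).toNat + 1) ft.bit idx val := by
    rw [fenInc, hop]
  rw [hbit]
  obtain ⟨hlb0, hlble⟩ := lowb_pos (show (0:Int) < idx by omega)
  apply fenIncLoop_inv ft.n f idx val hidx hin ((ft.n - idx).toNat + 1) idx ft.bit hn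
    le_rfl (by omega) (by omega)
  · intro j hj1 hjn hjlt
    have hsum : (∑ k ∈ Finset.Ioc (j - lowb j) j, Function.update f idx (f idx + val) k)
        = ∑ k ∈ Finset.Ioc (j - lowb j) j, f k := by
      apply Finset.sum_congr rfl
      intro k hk
      rw [Finset.mem_Ioc] at hk
      exact Function.update_of_ne (by omega) _ f
    rw [hsum]
    exact hF j hj1 hjn
  · intro j hj1 hjn _
    exact hF j hj1 hjn

lemma fenPreLoop_eq (n : Int) (f : Int → Int) (bit : List Int)
    (hF : FInv n f bit) :
    ∀ (fuel : Nat) (x ans : Int), x ≤ n → x.toNat ≤ fuel →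
      fenPreLoop bit fuel x ans ≡ (ans + ∑ k ∈ Finset.Ioc 0 x, f k) [ZMOD 998244353] := by
  intro fuel
  induction fuel with
  | zero =>
    intro x ans hx hfuel
    have hx0 : x ≤ 0 := by omega
    rw [Finset.Ioc_eq_empty (by omega)]
    simp [fenPreLoop]
  | succ fuel ih =>
    intro x ans hx hfuel
    by_cases hx0 : x > 0
    · obtain ⟨hlb0, hlble⟩ := lowb_pos hx0
      have hstep : fenPreLoop bit (fuel + 1) x ans =
          fenPreLoop bit fuel (x - lowb x) (ans + PySem.List.pyGetD bit x 0) := by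
        simp [fenPreLoop, hx0]; rfl
      rw [hstep]
      have hih := ih (x - lowb x) (ans + PySem.List.pyGetD bit x 0) (by omega) (by omega)
      have hcell := hF x (by omega) hx
      have hsplit := sum_Ioc_split f (show (0:ℤ) ≤ x - lowb x by omega)
        (show x - lowb x ≤ x by omega)
      calc fenPreLoop bit fuel (x - lowb x) (ans + PySem.List.pyGetD bit x 0)
          ≡ ans + PySem.List.pyGetD bit x 0 + ∑ k ∈ Finset.Ioc 0 (x - lowb x), f k
            [ZMOD 998244353] := hih
        _ ≡ ans + ∑ k ∈ Finset.Ioc (x - lowb x) x, f k + ∑ k ∈ Finset.Ioc 0 (x - lowb x), f k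
            [ZMOD 998244353] := by
            exact Int.ModEq.add_right _ (Int.ModEq.add_left ans hcell)
        _ = ans + ∑ k ∈ Finset.Ioc 0 x, f k := by rw [← hsplit]; ring
    · have : fenPreLoop bit (fuel + 1) x ans = ans := by
        simp [fenPreLoop]; omega
      rw [this, Finset.Ioc_eq_empty (by omega)]
      simp

lemma fenPrefixsum_eq {n : Int} {f : Int → Int} {ft : Fenwick}
    (hF : FInv n f ft.bit) (x : Int) (hx : x ≤ n) :
    fenPrefixsum ft x ≡ (∑ k ∈ Finset.Ioc 0 x, f k) [ZMOD 998244353] := by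
  unfold fenPrefixsum
  by_cases h : x < 1
  · rw [if_pos h, Finset.Ioc_eq_empty (by omega)]
    simp
  · rw [if_neg h]
    have := fenPreLoop_eq n f ft.bit hF x.toNat x 0 hx le_rfl
    simpa using this

-- ---- sums over the support (i, N] ----
lemma pref_as_suff {f : Int → Int} {i N : Int} (hi : 0 ≤ i)
    (h0 : ∀ k : Int, k ≤ i → f k = 0) (hN : ∀ k : Int, N < k → f k = 0)
    (x : Int) (hx : x ≤ N) :
    ∑ k ∈ Finset.Ioc 0 x, f k =
      (∑ k ∈ Finset.Ioc i N, f k) - ∑ k ∈ Finset.Ioc (max x i) N, f k := by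
  by_cases hxi : x ≤ i
  · rw [max_eq_right hxi]
    have : ∑ k ∈ Finset.Ioc 0 x, f k = 0 := by
      apply Finset.sum_eq_zero
      intro k hk
      rw [Finset.mem_Ioc] at hk
      exact h0 k (by omega)
    rw [this]; ring
  · rw [max_eq_left (by omega)]
    have h1 : ∑ k ∈ Finset.Ioc i x, f k + ∑ k ∈ Finset.Ioc x N, f k
        = ∑ k ∈ Finset.Ioc i N, f k := sum_Ioc_split f (by omega) hx
    have h2 : ∑ k ∈ Finset.Ioc 0 i, f k + ∑ k ∈ Finset.Ioc i x, f k
        = ∑ k ∈ Finset.Ioc 0 x, f k := sum_Ioc_split f hi (by omega)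
    have h3 : ∑ k ∈ Finset.Ioc 0 i, f k = 0 := by
      apply Finset.sum_eq_zero
      intro k hk
      rw [Finset.mem_Ioc] at hk
      exact h0 k (by omega)
    omega

lemma inner_eq {N i : Int} {ft : Fenwick} {S : List Int} {f : Int → Int}
    (hF : FInv (N + 1) f ft.bit)
    (hS : ∀ j : Int, i + 1 ≤ j → j ≤ N + 1 →
      PySem.List.pyGetD S j 0 = ∑ k ∈ Finset.Ioc (j - 1) N, f k)
    (h0 : ∀ k : Int, k ≤ i → f k = 0) (hN : ∀ k : Int, N < k → f k = 0)
    (hi : 1 ≤ i) (hiN : i ≤ N - 1) (Lz : List (Int × Int)) :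
    solveInner N ft i Lz = altInner N S i Lz := by
  unfold solveInner altInner
  suffices h : ∀ (lz : List (Int × Int)) (v : Int),
      lz.foldl (fun v lr =>
        if i + lr.1 > N then v
        else PySem.Int.mod (v + fenRangesum ft (i + lr.1) (min N (i + lr.2))) 998244353) v =
      lz.foldl (fun v lr =>
        let lo := i + lr.1
        if lo > N then v
        else
          let hi := min N (i + lr.2)
          PySem.Int.mod
            (v + PySem.List.pyGetD S (max lo (i + 1)) 0 -
              PySem.List.pyGetD S (max (hi + 1) (i + 1)) 0) 998244353) v from h Lz 0
  intro lz
  induction lz with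
  | nil => intro v; rfl
  | cons lr rest ih =>
    intro v
    simp only [List.foldl_cons]
    have hstep :
        (if i + lr.1 > N then v
         else PySem.Int.mod (v + fenRangesum ft (i + lr.1) (min N (i + lr.2))) 998244353) =
        (let lo := i + lr.1
         if lo > N then v
         else
           let hi := min N (i + lr.2)
           PySem.Int.mod
             (v + PySem.List.pyGetD S (max lo (i + 1)) 0 -
               PySem.List.pyGetD S (max (hi + 1) (i + 1)) 0) 998244353) := by
      show _ = (if i + lr.1 > N then v
         else PySem.Int.mod
             (v + PySem.List.pyGetD S (max (i + lr.1) (i + 1)) 0 -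
               PySem.List.pyGetD S (max (min N (i + lr.2) + 1) (i + 1)) 0) 998244353)
      by_cases hskip : i + lr.1 > N
      · rw [if_pos hskip, if_pos hskip]
      · rw [if_neg hskip, if_neg hskip]
        have hlo : i + lr.1 ≤ N := by omega
        have hhi : min N (i + lr.2) ≤ N := min_le_left _ _
        have hP1 := fenPrefixsum_eq hF (min N (i + lr.2)) (by omega)
        have hP2 := fenPrefixsum_eq hF (i + lr.1 - 1) (by omega)
        have hE1 := pref_as_suff (by omega) h0 hN (min N (i + lr.2)) hhi
        have hE2 := pref_as_suff (by omega) h0 hN (i + lr.1 - 1) (by omega)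
        have hS1 : PySem.List.pyGetD S (max (i + lr.1) (i + 1)) 0
            = ∑ k ∈ Finset.Ioc (max (i + lr.1 - 1) i) N, f k := by
          rw [hS (max (i + lr.1) (i + 1)) (le_max_right _ _) (by omega)]
          congr 2
          omega
        have hS2 : PySem.List.pyGetD S (max (min N (i + lr.2) + 1) (i + 1)) 0
            = ∑ k ∈ Finset.Ioc (max (min N (i + lr.2)) i) N, f k := by
          rw [hS (max (min N (i + lr.2) + 1) (i + 1)) (le_max_right _ _) (by omega)]
          congr 2
          omega
        apply pymod_congr
        have hd : fenRangesum ft (i + lr.1) (min N (i + lr.2)) ≡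
            (PySem.List.pyGetD S (max (i + lr.1) (i + 1)) 0 -
              PySem.List.pyGetD S (max (min N (i + lr.2) + 1) (i + 1)) 0) [ZMOD 998244353] := by
          unfold fenRangesum
          rw [hS1, hS2]
          calc fenPrefixsum ft (min N (i + lr.2)) - fenPrefixsum ft (i + lr.1 - 1)
              ≡ (∑ k ∈ Finset.Ioc 0 (min N (i + lr.2)), f k) -
                ∑ k ∈ Finset.Ioc 0 (i + lr.1 - 1), f k [ZMOD 998244353] := hP1.sub hP2
            _ = (∑ k ∈ Finset.Ioc (max (i + lr.1 - 1) i) N, f k) -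
                ∑ k ∈ Finset.Ioc (max (min N (i + lr.2)) i) N, f k := by
                rw [hE1, hE2]; ring
        calc v + fenRangesum ft (i + lr.1) (min N (i + lr.2))
            ≡ v + (PySem.List.pyGetD S (max (i + lr.1) (i + 1)) 0 -
                PySem.List.pyGetD S (max (min N (i + lr.2) + 1) (i + 1)) 0) [ZMOD 998244353] :=
              hd.add_left v
          _ = v + PySem.List.pyGetD S (max (i + lr.1) (i + 1)) 0 -
              PySem.List.pyGetD S (max (min N (i + lr.2) + 1) (i + 1)) 0 := by ring
    rw [hstep]
    exact ih _

lemma loop_eq (N : Int) (Lz : List (Int × Int)) :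
    ∀ (m : Nat) (ft : Fenwick) (S : List Int) (f : Int → Int),
      (m : Int) ≤ N - 1 →
      ft.n = N + 1 → ft.op = fenwicktreeop → ft.bit.length = (N + 2).toNat →
      S.length = (N + 2).toNat →
      FInv (N + 1) f ft.bit →
      (∀ j : Int, (m : Int) + 1 ≤ j → j ≤ N + 1 →
        PySem.List.pyGetD S j 0 = ∑ k ∈ Finset.Ioc (j - 1) N, f k) →
      (∀ k : Int, k ≤ (m : Int) → f k = 0) → (∀ k : Int, N < k → f k = 0) →
      solveLoop N Lz (PySem.List.pyRange (m : Int) 0 (-1)) ft =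
        altLoop N Lz (PySem.List.pyRange (m : Int) 0 (-1)) S := by
  intro m
  induction m with
  | zero =>
    intro _ _ _ _ _ _ _ _ _ _ _ _
    rw [show ((0 : Nat) : Int) = 0 from rfl, PySem.List.pyRange_neg_one_eq_nil le_rfl]
    rfl
  | succ m ih =>
    intro ft S f hmN hn hop hblen hSlen hF hS h0 hN
    have hi1 : (1 : Int) ≤ ((m + 1 : Nat) : Int) := by push_cast; omega
    rw [PySem.List.pyRange_neg_one_cons (by omega)]
    have hv : solveInner N ft ((m + 1 : Nat) : Int) Lz = altInner N S ((m + 1 : Nat) : Int) Lz :=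
      inner_eq hF (by
        intro j hj1 hj2
        exact hS j (by push_cast at hj1 ⊢; omega) hj2) h0 hN hi1 hmN Lz
    show solveLoop N Lz (((m + 1 : Nat) : Int) :: _) ft = altLoop N Lz (((m + 1 : Nat) : Int) :: _) S
    rw [solveLoop, altLoop, ← hv]
    by_cases h1 : ((m + 1 : Nat) : Int) = 1
    · rw [if_pos h1, if_pos h1]
    · rw [if_neg h1, if_neg h1]
      have hm1 : (1 : Int) ≤ (m : Int) := by push_cast at h1 ⊢; omega
      set i : Int := ((m + 1 : Nat) : Int) with hidef
      set v : Int := solveInner N ft i Lz with hvdef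
      have hcast : ((m + 1 : Nat) : Int) - 1 = (m : Int) := by push_cast; ring
      rw [hcast]
      have hF' : FInv ft.n f ft.bit := by rw [hn]; exact hF
      have hblen2 : ft.bit.length = (ft.n + 1).toNat := by
        rw [hblen, hn]
        omega
      have hfin := fenInc_inv (ft := ft) (f := f) (idx := i) (val := v) hop hblen2
        (by omega) (by rw [hn]; omega) hF'
      rw [hn] at hfin
      have hSlen' : (PySem.List.pySetD S i (v + PySem.List.pyGetD S (i + 1) 0)).length
          = (N + 2).toNat := by rw [PySem.List.length_pySetD, hSlen]
      have hSnew : ∀ j : Int, (m : Int) + 1 ≤ j → j ≤ N + 1 →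
          PySem.List.pyGetD (PySem.List.pySetD S i (v + PySem.List.pyGetD S (i + 1) 0)) j 0
            = ∑ k ∈ Finset.Ioc (j - 1) N, Function.update f i (f i + v) k := by
        intro j hj1 hj2
        have hjlt : j < ((S.length : Int)) := by rw [hSlen]; omega
        have hival : (0:Int) ≤ i := by omega
        rw [pyGetD_pySetD_int hival (by rw [hSlen]; omega) (by omega) hjlt]
        by_cases hji : j = i
        · rw [if_pos hji, hji]
          have hSj1 := hS (i + 1) (by omega) (by omega)
          have hfj : f i = 0 := h0 i le_rfl
          have hsplit : ∑ k ∈ Finset.Ioc (i - 1) N, Function.update f i (f i + v) k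
              = Function.update f i (f i + v) i +
                ∑ k ∈ Finset.Ioc i N, Function.update f i (f i + v) k := by
            rw [← sum_Ioc_split (fun k => Function.update f i (f i + v) k)
                (show i - 1 ≤ i by omega) (show i ≤ N by omega)]
            congr 1
            rw [show Finset.Ioc (i - 1) i = {i} from by
              ext x; rw [Finset.mem_Ioc, Finset.mem_singleton]; omega]
            rw [Finset.sum_singleton]
          rw [hsplit]
          have hrest : ∑ k ∈ Finset.Ioc i N, Function.update f i (f i + v) k
              = ∑ k ∈ Finset.Ioc i N, f k := by
            apply Finset.sum_congr rfl
            intro k hk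
            rw [Finset.mem_Ioc] at hk
            exact Function.update_of_ne (by omega) _ f
          rw [hrest, Function.update_self, hfj, hSj1]
          have : i + 1 - 1 = i := by ring
          rw [this]
          ring
        · rw [if_neg hji]
          have hji' : i < j := by omega
          rw [hS j (by omega) hj2]
          apply Finset.sum_congr rfl
          intro k hk
          rw [Finset.mem_Ioc] at hk
          exact (Function.update_of_ne (by omega) _ f).symm
      have h0new : ∀ k : Int, k ≤ (m : Int) → Function.update f i (f i + v) k = 0 := by
        intro k hk
        rw [Function.update_of_ne (by omega) _ f]
        exact h0 k (by omega)
      have hNnew : ∀ k : Int, N < k → Function.update f i (f i + v) k = 0 := by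
        intro k hk
        rw [Function.update_of_ne (by omega) _ f]
        exact hN k hk
      exact ih (fenInc ft i v) (PySem.List.pySetD S i (v + PySem.List.pyGetD S (i + 1) 0))
        (Function.update f i (f i + v)) (by omega) hn hop
        (by have := hfin.2; omega) hSlen' hfin.1 hSnew h0new hNnew

theorem solve_spec : Claim_equal_solve := by
  intro N K L R _ hpre
  have hN1 : (1 : Int) ≤ N := hpre
  show solve N K L R = solve_alt N K L R
  unfold solve solve_alt
  show solveLoop N (L.zip R) (PySem.List.pyRange (N - 1) 0 (-1))
      (fenInc { n := N + 1, tot := 0, e := 0, op := fenwicktreeop,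
                bit := List.replicate ((N + 1) + 1).toNat 0 } N 1)
    = altLoop N (L.zip R) (PySem.List.pyRange (N - 1) 0 (-1))
      (PySem.List.pySetD (List.replicate (N + 2).toNat 0) N 1)
  have hblen : (List.replicate ((N + 1) + 1).toNat (0 : Int)).length = ((N + 1) + 1).toNat :=
    List.length_replicate
  have hF0 : FInv (N + 1) (fun _ => 0) (List.replicate ((N + 1) + 1).toNat (0 : Int)) := by
    intro j hj1 hj2
    rw [PySem.List.pyGetD_eq_getElem _ 0 (by omega) (by rw [hblen]; omega)]
    simp
  have hfin := fenInc_inv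
    (ft := { n := N + 1, tot := 0, e := 0, op := fenwicktreeop,
             bit := List.replicate ((N + 1) + 1).toNat 0 })
    (f := fun _ => 0) (idx := N) (val := 1) rfl hblen hN1
    (show N ≤ N + 1 by omega) hF0
  have hSlen : (PySem.List.pySetD (List.replicate (N + 2).toNat (0 : Int)) N 1).length
      = (N + 2).toNat := by rw [PySem.List.length_pySetD, List.length_replicate]
  have hcast : ((N - 1).toNat : Int) = N - 1 := by omega
  have hS0 : ∀ j : Int, ((N - 1).toNat : Int) + 1 ≤ j → j ≤ N + 1 →
      PySem.List.pyGetD (PySem.List.pySetD (List.replicate (N + 2).toNat (0 : Int)) N 1) j 0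
        = ∑ k ∈ Finset.Ioc (j - 1) N,
            Function.update (fun _ => (0 : Int)) N ((fun _ => (0 : Int)) N + 1) k := by
    intro j hj1 hj2
    rw [hcast] at hj1
    rw [pyGetD_pySetD_int (show (0:Int) ≤ N by omega)
      (by rw [List.length_replicate]; omega) (show (0:Int) ≤ j by omega)
      (by rw [List.length_replicate]; omega)]
    by_cases hjN : j = N
    · rw [if_pos hjN,
        show Finset.Ioc (j - 1) N = {j} from by
          ext x; rw [Finset.mem_Ioc, Finset.mem_singleton]; omega,
        Finset.sum_singleton, hjN, Function.update_self]
      norm_num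
    · rw [if_neg hjN]
      rw [PySem.List.pyGetD_eq_getElem _ 0 (by omega) (by rw [List.length_replicate]; omega),
        Finset.Ioc_eq_empty (show ¬(j - 1 < N) by omega)]
      simp
  have h00 : ∀ k : Int, k ≤ ((N - 1).toNat : Int) →
      Function.update (fun _ => (0 : Int)) N ((fun _ => (0 : Int)) N + 1) k = 0 := by
    intro k hk
    rw [hcast] at hk
    exact Function.update_of_ne (by omega) _ _
  have h0N : ∀ k : Int, N < k →
      Function.update (fun _ => (0 : Int)) N ((fun _ => (0 : Int)) N + 1) k = 0 := by
    intro k hk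
    exact Function.update_of_ne (by omega) _ _
  have hblen' : (fenInc
      { n := N + 1, tot := 0, e := 0, op := fenwicktreeop,
        bit := List.replicate ((N + 1) + 1).toNat 0 } N 1).bit.length = (N + 2).toNat := by
    rw [hfin.2]
    show (N + 1 + 1).toNat = (N + 2).toNat
    omega
  have hmain := loop_eq N (L.zip R) (N - 1).toNat
    (fenInc { n := N + 1, tot := 0, e := 0, op := fenwicktreeop,
              bit := List.replicate ((N + 1) + 1).toNat 0 } N 1)
    (PySem.List.pySetD (List.replicate (N + 2).toNat 0) N 1)
    (Function.update (fun _ => (0 : Int)) N ((fun _ => (0 : Int)) N + 1))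
    (by omega) rfl rfl hblen' hSlen hfin.1 hS0 h00 h0N
  rw [hcast] at hmain
  exact hmain
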